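-- pv_equiv track=rewrite | github.com/rkechols/KattisAssorted | solved/ptice.py | ptice
-- ===== SOURCE A (Python) =====
-- from typing import Set, Tuple
--
-- ADRIAN = "Adrian"
--
-- BRUNO = "Bruno"
--
-- GORAN = "Goran"
--
-- ADRIAN_SEQ = ["A", "B", "C"]
--
-- BRUNO_SEQ = ["B", "A", "B", "C"]
--
-- GORAN_SEQ = ["C", "C", "A", "A", "B", "B"]
--
-- N_ADRIAN = len(ADRIAN_SEQ)
--
-- N_BRUNO = len(BRUNO_SEQ)
--
-- N_GORAN = len(GORAN_SEQ)
--
-- def ptice(answers: str) -> Tuple[int, Set[str]]: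
-- 	a_score = 0
-- 	b_score = 0
-- 	g_score = 0
-- 	for i, answer in enumerate(answers):
-- 		if ADRIAN_SEQ[i % N_ADRIAN] == answer:
-- 			a_score += 1
-- 		if BRUNO_SEQ[i % N_BRUNO] == answer:
-- 			b_score += 1
-- 		if GORAN_SEQ[i % N_GORAN] == answer:
-- 			g_score += 1
-- 	winning_score = max(a_score, b_score, g_score)
-- 	winners_set = set()
-- 	if a_score == winning_score:
-- 		winners_set.add(ADRIAN)
-- 	if b_score == winning_score:
-- 		winners_set.add(BRUNO)
-- 	if g_score == winning_score:
-- 		winners_set.add(GORAN)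
-- 	return winning_score, winners_set
-- ===== SOURCE B (Python) =====
-- ADRIAN = "Adrian"
-- BRUNO = "Bruno"
-- GORAN = "Goran"
-- ADRIAN_SEQ = ["A", "B", "C"]
-- BRUNO_SEQ = ["B", "A", "B", "C"]
-- GORAN_SEQ = ["C", "C", "A", "A", "B", "B"]
--
--
-- def ptice(answers):
--     # Histogram of (position mod 12, answer letter); 12 = lcm(3, 4, 6).
--     hist = {}
--     for i, answer in enumerate(answers):
--         key = (i % 12, answer)
--         hist[key] = hist.get(key, 0) + 1
--
--     def score(seq):
--         n = len(seq)
--         return sum(hist.get((r, seq[r % n]), 0) for r in range(12))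
--
--     a_score = score(ADRIAN_SEQ)
--     b_score = score(BRUNO_SEQ)
--     g_score = score(GORAN_SEQ)
--     winning_score = max(a_score, b_score, g_score)
--     winners_set = set()
--     if a_score == winning_score:
--         winners_set.add(ADRIAN)
--     if b_score == winning_score:
--         winners_set.add(BRUNO)
--     if g_score == winning_score:
--         winners_set.add(GORAN)
--     return winning_score, winners_set
-- ===== Notes on version B (the rewrite author's own statement) =====
-- stated objective: alternative
-- what changed: B first builds a histogram keyed by (position mod 12, answer letter) in one pass, then computes each contestant's score by summing histogram counts over the 12 residue classes with that contestant's cyclic key letter, instead of A's three comparisons per answer.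
import Mathlib
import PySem

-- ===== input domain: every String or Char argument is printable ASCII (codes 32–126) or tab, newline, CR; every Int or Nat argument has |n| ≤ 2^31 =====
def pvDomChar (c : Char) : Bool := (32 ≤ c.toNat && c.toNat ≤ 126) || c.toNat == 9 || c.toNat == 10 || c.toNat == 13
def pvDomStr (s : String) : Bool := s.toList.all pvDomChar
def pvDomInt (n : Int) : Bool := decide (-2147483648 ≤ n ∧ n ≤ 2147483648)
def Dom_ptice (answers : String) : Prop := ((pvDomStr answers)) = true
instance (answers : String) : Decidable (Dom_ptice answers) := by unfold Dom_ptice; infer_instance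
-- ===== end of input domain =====

-- B replaces A's three-comparisons-per-answer loop by a (position mod 12, letter) histogram
-- scored over the 12 residue classes (12 = lcm 3 4 6); a different decomposition of the same task.

-- ===== PORT A =====
def pticeSeqA : List Char := ['A', 'B', 'C']
def pticeSeqB : List Char := ['B', 'A', 'B', 'C']
def pticeSeqG : List Char := ['C', 'C', 'A', 'A', 'B', 'B']

-- "for i, answer in enumerate(answers):" with the three ifs on SEQ[i % N]
def pticeLoopA : List Char → Nat → Int → Int → Int → Int × Int × Int
  | [], _, a, b, g => (a, b, g)
  | c :: rest, i, a, b, g =>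
    let a := if PySem.List.pyGetD pticeSeqA (PySem.Int.mod (i : Int) 3) ' ' = c then a + 1 else a
    let b := if PySem.List.pyGetD pticeSeqB (PySem.Int.mod (i : Int) 4) ' ' = c then b + 1 else b
    let g := if PySem.List.pyGetD pticeSeqG (PySem.Int.mod (i : Int) 6) ' ' = c then g + 1 else g
    pticeLoopA rest (i + 1) a b g

def ptice (answers : String) : Int × List String :=
  let scores := pticeLoopA answers.toList 0 0 0 0
  let a_score := scores.1
  let b_score := scores.2.1
  let g_score := scores.2.2
  let winning_score := max a_score (max b_score g_score)
  let s0 : PySem.Set String := PySem.Set.empty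
  let s1 := if a_score = winning_score then PySem.Set.add s0 "Adrian" else s0
  let s2 := if b_score = winning_score then PySem.Set.add s1 "Bruno" else s1
  let s3 := if g_score = winning_score then PySem.Set.add s2 "Goran" else s2
  (winning_score, s3)

-- ===== PORT B =====
-- "hist[(i % 12, answer)] = hist.get((i % 12, answer), 0) + 1" over enumerate(answers)
def pticeHist : List Char → Nat → PySem.Dict (Int × Char) Int → PySem.Dict (Int × Char) Int
  | [], _, d => d
  | c :: rest, i, d =>
    let k := (PySem.Int.mod (i : Int) 12, c)
    pticeHist rest (i + 1) (d.insert k (d.getD k 0 + 1))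

-- "sum(hist.get((r, seq[r % n]), 0) for r in range(12))"
def pticeScore (hist : PySem.Dict (Int × Char) Int) (seq : List Char) : Int :=
  (PySem.List.pyRange 0 12 1).foldl
    (fun s r => s + hist.getD (r, PySem.List.pyGetD seq (PySem.Int.mod r (PySem.List.len seq)) ' ') 0) 0

def ptice_alt (answers : String) : Int × List String :=
  let hist := pticeHist answers.toList 0 PySem.Dict.empty
  let a_score := pticeScore hist pticeSeqA
  let b_score := pticeScore hist pticeSeqB
  let g_score := pticeScore hist pticeSeqG
  let winning_score := max a_score (max b_score g_score)
  let s0 : PySem.Set String := PySem.Set.empty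
  let s1 := if a_score = winning_score then PySem.Set.add s0 "Adrian" else s0
  let s2 := if b_score = winning_score then PySem.Set.add s1 "Bruno" else s1
  let s3 := if g_score = winning_score then PySem.Set.add s2 "Goran" else s2
  (winning_score, s3)

-- ===== PRECONDITION & SPEC =====
def Spec_ptice (answers : String) (out : Int × List String) : Prop := out = ptice_alt answers
instance (answers : String) (out : Int × List String) : Decidable (Spec_ptice answers out) := by unfold Spec_ptice; infer_instance

-- ===== CLAIM (what is proved, stated in full; the proofs are below) =====
def Claim_equal_ptice : Prop := ∀ (answers : String), Dom_ptice answers → Spec_ptice answers (ptice answers)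

-- ===== LEMMAS AND PROOFS =====

-- number of answers (from start index i) matching seq's cyclic letter
def pticeCnt (seq : List Char) : List Char → Nat → Int
  | [], _ => 0
  | c :: rest, i => (if seq.getD (i % seq.length) ' ' = c then 1 else 0) + pticeCnt seq rest (i + 1)

theorem pticeMod3 (i : Nat) : PySem.Int.mod (i : Int) 3 = ((i % 3 : Nat) : Int) := by
  exact_mod_cast PySem.Int.mod_natCast i 3
theorem pticeMod4 (i : Nat) : PySem.Int.mod (i : Int) 4 = ((i % 4 : Nat) : Int) := by
  exact_mod_cast PySem.Int.mod_natCast i 4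
theorem pticeMod6 (i : Nat) : PySem.Int.mod (i : Int) 6 = ((i % 6 : Nat) : Int) := by
  exact_mod_cast PySem.Int.mod_natCast i 6
theorem pticeMod12 (i : Nat) : PySem.Int.mod (i : Int) 12 = ((i % 12 : Nat) : Int) := by
  exact_mod_cast PySem.Int.mod_natCast i 12

theorem pticeLoopA_eq (l : List Char) : ∀ (i : Nat) (a b g : Int),
    pticeLoopA l i a b g =
      (a + pticeCnt pticeSeqA l i, b + pticeCnt pticeSeqB l i, g + pticeCnt pticeSeqG l i) := by
  induction l with
  | nil => intro i a b g; simp [pticeLoopA, pticeCnt]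
  | cons c rest ih =>
    intro i a b g
    simp only [pticeLoopA, pticeCnt, ih, pticeMod3, pticeMod4, pticeMod6,
      PySem.List.pyGetD_natCast, pticeSeqA, pticeSeqB, pticeSeqG,
      List.length_cons, List.length_nil, Nat.reduceAdd]
    split_ifs <;> simp [Prod.ext_iff] <;> omega

-- the 12-residue score as an explicit sum (definitional)
theorem pticeScoreA_eq (d : PySem.Dict (Int × Char) Int) : pticeScore d pticeSeqA =
    0 + d.getD (0,'A') 0 + d.getD (1,'B') 0 + d.getD (2,'C') 0 + d.getD (3,'A') 0 + d.getD (4,'B') 0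
      + d.getD (5,'C') 0 + d.getD (6,'A') 0 + d.getD (7,'B') 0 + d.getD (8,'C') 0 + d.getD (9,'A') 0
      + d.getD (10,'B') 0 + d.getD (11,'C') 0 := rfl

theorem pticeScoreB_eq (d : PySem.Dict (Int × Char) Int) : pticeScore d pticeSeqB =
    0 + d.getD (0,'B') 0 + d.getD (1,'A') 0 + d.getD (2,'B') 0 + d.getD (3,'C') 0 + d.getD (4,'B') 0
      + d.getD (5,'A') 0 + d.getD (6,'B') 0 + d.getD (7,'C') 0 + d.getD (8,'B') 0 + d.getD (9,'A') 0
      + d.getD (10,'B') 0 + d.getD (11,'C') 0 := rfl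

theorem pticeScoreG_eq (d : PySem.Dict (Int × Char) Int) : pticeScore d pticeSeqG =
    0 + d.getD (0,'C') 0 + d.getD (1,'C') 0 + d.getD (2,'A') 0 + d.getD (3,'A') 0 + d.getD (4,'B') 0
      + d.getD (5,'B') 0 + d.getD (6,'C') 0 + d.getD (7,'C') 0 + d.getD (8,'A') 0 + d.getD (9,'A') 0
      + d.getD (10,'B') 0 + d.getD (11,'B') 0 := rfl

theorem pticeScoreA_insert (d : PySem.Dict (Int × Char) Int) (i : Nat) (c : Char) :
    pticeScore (d.insert (PySem.Int.mod (i : Int) 12, c)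
        (d.getD (PySem.Int.mod (i : Int) 12, c) 0 + 1)) pticeSeqA
      = pticeScore d pticeSeqA + (if pticeSeqA.getD (i % 3) ' ' = c then 1 else 0) := by
  rw [pticeMod12]
  have h3 : i % 12 % 3 = i % 3 := Nat.mod_mod_of_dvd i (by norm_num)
  rw [← h3]
  have hj : i % 12 < 12 := Nat.mod_lt _ (by norm_num)
  set j := i % 12 with hjdef
  clear_value j
  rw [pticeScoreA_eq, pticeScoreA_eq]
  interval_cases j <;>
    simp [pticeSeqA, PySem.Dict.getD_insert, Prod.ext_iff] <;>
    split_ifs with h <;> (try subst c) <;> ring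

theorem pticeScoreB_insert (d : PySem.Dict (Int × Char) Int) (i : Nat) (c : Char) :
    pticeScore (d.insert (PySem.Int.mod (i : Int) 12, c)
        (d.getD (PySem.Int.mod (i : Int) 12, c) 0 + 1)) pticeSeqB
      = pticeScore d pticeSeqB + (if pticeSeqB.getD (i % 4) ' ' = c then 1 else 0) := by
  rw [pticeMod12]
  have h4 : i % 12 % 4 = i % 4 := Nat.mod_mod_of_dvd i (by norm_num)
  rw [← h4]
  have hj : i % 12 < 12 := Nat.mod_lt _ (by norm_num)
  set j := i % 12 with hjdef
  clear_value j
  rw [pticeScoreB_eq, pticeScoreB_eq]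
  interval_cases j <;>
    simp [pticeSeqB, PySem.Dict.getD_insert, Prod.ext_iff] <;>
    split_ifs with h <;> (try subst c) <;> ring

theorem pticeScoreG_insert (d : PySem.Dict (Int × Char) Int) (i : Nat) (c : Char) :
    pticeScore (d.insert (PySem.Int.mod (i : Int) 12, c)
        (d.getD (PySem.Int.mod (i : Int) 12, c) 0 + 1)) pticeSeqG
      = pticeScore d pticeSeqG + (if pticeSeqG.getD (i % 6) ' ' = c then 1 else 0) := by
  rw [pticeMod12]
  have h6 : i % 12 % 6 = i % 6 := Nat.mod_mod_of_dvd i (by norm_num)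
  rw [← h6]
  have hj : i % 12 < 12 := Nat.mod_lt _ (by norm_num)
  set j := i % 12 with hjdef
  clear_value j
  rw [pticeScoreG_eq, pticeScoreG_eq]
  interval_cases j <;>
    simp [pticeSeqG, PySem.Dict.getD_insert, Prod.ext_iff] <;>
    split_ifs with h <;> (try subst c) <;> ring

theorem pticeHist_scoreA (l : List Char) : ∀ (i : Nat) (d : PySem.Dict (Int × Char) Int),
    pticeScore (pticeHist l i d) pticeSeqA = pticeScore d pticeSeqA + pticeCnt pticeSeqA l i := by
  induction l with
  | nil => intro i d; simp [pticeHist, pticeCnt]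
  | cons c rest ih =>
    intro i d
    simp only [pticeHist, pticeCnt, ih, pticeScoreA_insert]
    have hlen : pticeSeqA.length = 3 := rfl
    rw [hlen]; ring

theorem pticeHist_scoreB (l : List Char) : ∀ (i : Nat) (d : PySem.Dict (Int × Char) Int),
    pticeScore (pticeHist l i d) pticeSeqB = pticeScore d pticeSeqB + pticeCnt pticeSeqB l i := by
  induction l with
  | nil => intro i d; simp [pticeHist, pticeCnt]
  | cons c rest ih =>
    intro i d
    simp only [pticeHist, pticeCnt, ih, pticeScoreB_insert]
    have hlen : pticeSeqB.length = 4 := rfl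
    rw [hlen]; ring

theorem pticeHist_scoreG (l : List Char) : ∀ (i : Nat) (d : PySem.Dict (Int × Char) Int),
    pticeScore (pticeHist l i d) pticeSeqG = pticeScore d pticeSeqG + pticeCnt pticeSeqG l i := by
  induction l with
  | nil => intro i d; simp [pticeHist, pticeCnt]
  | cons c rest ih =>
    intro i d
    simp only [pticeHist, pticeCnt, ih, pticeScoreG_insert]
    have hlen : pticeSeqG.length = 6 := rfl
    rw [hlen]; ring

-- ===== VERDICT (by name: the statement is the Claim_ definition above) =====
theorem ptice_spec : Claim_equal_ptice := by
  intro answers _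
  unfold Spec_ptice ptice ptice_alt
  have hA := pticeHist_scoreA answers.toList 0 PySem.Dict.empty
  have hB := pticeHist_scoreB answers.toList 0 PySem.Dict.empty
  have hG := pticeHist_scoreG answers.toList 0 PySem.Dict.empty
  have eA : pticeScore PySem.Dict.empty pticeSeqA = 0 := by decide
  have eB : pticeScore PySem.Dict.empty pticeSeqB = 0 := by decide
  have eG : pticeScore PySem.Dict.empty pticeSeqG = 0 := by decide
  rw [pticeLoopA_eq]
  simp only [hA, hB, hG, eA, eB, eG, zero_add]
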